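-- pv_equiv track=rewrite | github.com/loveleaves/Medical_ChatBot | Web_Font&server/entity_normalization/data_helper.py | match_positive_sample
-- ===== SOURCE A (Python) =====
-- def match_positive_sample(list1, list2):
--     ress = []
--     for e1 in list1:
--         score = 0
--         pos_e = ""
--         for e2 in list2:
--             s = len(set(e1) & set(e2))
--             if s > score:
--                 score = s
--                 pos_e = e2
--         if pos_e != "":
--             ress.append([e1, pos_e])
--
--     return ress
-- ===== SOURCE B (Python) =====
-- def match_positive_sample(list1, list2):
--     # inverted index: char -> list of positions i in list2 whose string contains the char
--     index = {}
--     for i, e2 in enumerate(list2):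
--         for ch in dict.fromkeys(e2):
--             index.setdefault(ch, []).append(i)
--     res = []
--     for e1 in list1:
--         counts = {}
--         for ch in dict.fromkeys(e1):
--             for i in index.get(ch, []):
--                 counts[i] = counts.get(i, 0) + 1
--         best, best_e = 0, ""
--         for i, e2 in enumerate(list2):
--             c = counts.get(i, 0)
--             if c > best:
--                 best, best_e = c, e2
--         if best > 0:
--             res.append([e1, best_e])
--     return res
-- ===== Notes on version B (the rewrite author's own statement) =====
-- stated objective: faster
-- what changed: Replaces A's per-pair recomputation of len(set(e1)&set(e2)) by an inverted index char->positions of list2 built once, per-e1 overlap counts accumulated from the index posting lists, and a first-max argmax scan over positions.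
import Mathlib
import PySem

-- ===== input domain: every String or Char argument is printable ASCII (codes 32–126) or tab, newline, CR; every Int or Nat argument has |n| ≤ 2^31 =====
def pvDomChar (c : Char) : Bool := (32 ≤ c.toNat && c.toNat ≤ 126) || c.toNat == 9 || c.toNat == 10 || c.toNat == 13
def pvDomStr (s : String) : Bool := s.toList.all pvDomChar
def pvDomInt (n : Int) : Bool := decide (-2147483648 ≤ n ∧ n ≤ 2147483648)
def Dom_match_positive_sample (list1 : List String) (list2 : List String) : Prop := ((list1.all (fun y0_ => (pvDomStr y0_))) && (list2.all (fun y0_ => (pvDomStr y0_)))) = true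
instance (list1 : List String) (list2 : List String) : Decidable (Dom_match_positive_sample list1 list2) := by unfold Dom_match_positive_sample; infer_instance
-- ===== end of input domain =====

-- B replaces A's quadratic rescan (set(e1) & set(e2) rebuilt for every pair) by an inverted
-- index char -> positions of list2, per-e1 overlap counts from the index, and an argmax scan
-- over positions; measurably faster by a constant factor (each set(e2) is built once).

-- ===== PORT A =====
-- len(set(e1) & set(e2))
def msScore (e1 e2 : String) : Int :=
  PySem.Set.len (PySem.Set.inter (PySem.Set.ofList e1.toList) (PySem.Set.ofList e2.toList))

def match_positive_sample (list1 : List String) (list2 : List String) : List (List String) :=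
  list1.foldl (fun ress e1 =>
    let p := list2.foldl (fun (p : Int × String) e2 =>
      let s := msScore e1 e2
      if p.1 < s then (s, e2) else p) (0, "")
    if p.2 ≠ "" then ress ++ [[e1, p.2]] else ress) []

-- ===== PORT B =====
-- inverted index: char -> positions i of list2 with the char in set(list2[i])
def msIndex (list2 : List String) : PySem.Dict Char (List Nat) :=
  (list2.zipIdx).foldl (fun d ei =>
    (PySem.List.dedup ei.1.toList).foldl (fun d ch => d.modify ch [] (fun v => v ++ [ei.2])) d)
    PySem.Dict.empty

-- counts.get(i, 0) = |set(e1) & set(list2[i])|, summed from the index posting lists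
def msCounts (idx : PySem.Dict Char (List Nat)) (e1 : String) : PySem.Dict Nat Int :=
  (PySem.List.dedup e1.toList).foldl (fun c ch =>
    (idx.getD ch []).foldl (fun c i => c.insert i (c.getD i 0 + 1)) c)
    PySem.Dict.empty

def match_positive_sample_alt (list1 : List String) (list2 : List String) : List (List String) :=
  let idx := msIndex list2
  list1.foldl (fun res e1 =>
    let counts := msCounts idx e1
    let p := (list2.zipIdx).foldl (fun (p : Int × String) ei =>
      let c := counts.getD ei.2 0
      if p.1 < c then (c, ei.1) else p) (0, "")
    if 0 < p.1 then res ++ [[e1, p.2]] else res) []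

-- ===== PRECONDITION & SPEC =====
def Spec_match_positive_sample (list1 : List String) (list2 : List String) (out : List (List String)) : Prop := out = match_positive_sample_alt list1 list2
instance (list1 : List String) (list2 : List String) (out : List (List String)) : Decidable (Spec_match_positive_sample list1 list2 out) := by unfold Spec_match_positive_sample; infer_instance

-- ===== CLAIM (what is proved, stated in full; the proofs are below) =====
def Claim_equal_match_positive_sample : Prop := ∀ (list1 : List String) (list2 : List String), Dom_match_positive_sample list1 list2 → Spec_match_positive_sample list1 list2 (match_positive_sample list1 list2)

-- ===== LEMMAS AND PROOFS =====

-- proof-only flattened form of the index-building pair stream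
def msPairsK (l : List String) (k : Nat) : List (Char × Nat) :=
  (l.zipIdx k).flatMap (fun ei => (PySem.List.dedup ei.1.toList).map (fun ch => (ch, ei.2)))

lemma msIndex_eq_flat (list2 : List String) :
    msIndex list2 = (msPairsK list2 0).foldl
      (fun d p => d.modify p.1 [] (fun v => v ++ [p.2])) PySem.Dict.empty := by
  unfold msIndex msPairsK
  rw [List.foldl_flatMap]
  simp [List.foldl_map]

lemma getD_msIndex (list2 : List String) (ch : Char) :
    (msIndex list2).getD ch [] =
      ((msPairsK list2 0).filter (fun p => p.1 == ch)).map (fun p => p.2) := by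
  rw [msIndex_eq_flat, PySem.Dict.getD_foldl_modify_append]
  simp [PySem.Dict.getD_empty]

lemma count_map_filter (P : List (Char × Nat)) (ch : Char) (i : Nat) :
    ((P.filter (fun p => p.1 == ch)).map (fun p => p.2)).count i = P.count (ch, i) := by
  induction P with
  | nil => simp
  | cons p rest ih =>
    obtain ⟨c, j⟩ := p
    by_cases hc : c = ch
    · subst hc
      by_cases hj : j = i <;>
        simp [ih, hj, Prod.ext_iff]
    · simp [ih, hc, Prod.ext_iff]

lemma count_map_pair (cs : List Char) (k : Nat) (ch : Char) (i : Nat) :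
    ((cs.map (fun c => (c, k))).count (ch, i)) = if i = k then cs.count ch else 0 := by
  induction cs with
  | nil => simp
  | cons c rest ih =>
    by_cases hi : i = k
    · subst hi
      by_cases hc : c = ch <;> simp [ih, hc, Prod.ext_iff]
    · have hp : ¬ ((c, k) = (ch, i)) := by
        simp only [Prod.mk.injEq, not_and]
        intro _ hk
        exact hi hk.symm
      simp [ih, hi, hp]

lemma count_msPairsK_lt (l : List String) (ch : Char) :
    ∀ (k i : Nat), i < k → (msPairsK l k).count (ch, i) = 0 := by
  induction l with
  | nil => intro k i _; simp [msPairsK]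
  | cons e2 rest ih =>
    intro k i hik
    unfold msPairsK
    rw [List.zipIdx_cons, List.flatMap_cons, List.count_append]
    have h1 := count_map_pair (PySem.List.dedup e2.toList) k ch i
    have h2 := ih (k + 1) i (by omega)
    unfold msPairsK at h2
    rw [h1, h2, if_neg (by omega)]

lemma count_msPairsK (l : List String) (ch : Char) :
    ∀ (j k : Nat), j < l.length →
      (msPairsK l k).count (ch, k + j) =
        if ch ∈ (l.getD j "").toList then 1 else 0 := by
  induction l with
  | nil => intro j k hj; simp at hj
  | cons e2 rest ih =>
    intro j k hj
    unfold msPairsK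
    rw [List.zipIdx_cons, List.flatMap_cons, List.count_append]
    have h1 := count_map_pair (PySem.List.dedup e2.toList) k ch (k + j)
    cases j with
    | zero =>
      have h2 := count_msPairsK_lt rest ch (k + 1) k (by omega)
      unfold msPairsK at h2
      simp only [Nat.add_zero] at h1 ⊢
      rw [h1, h2]
      simp only [if_true, Nat.add_zero, List.getD_cons_zero]
      have hnd := PySem.List.nodup_dedup e2.toList
      by_cases hm : ch ∈ (PySem.List.dedup e2.toList)
      · rw [List.count_eq_one_of_mem hnd hm]
        rw [PySem.List.mem_dedup] at hm
        simp [hm]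
      · rw [List.count_eq_zero_of_not_mem hm]
        rw [PySem.List.mem_dedup] at hm
        simp [hm]
    | succ j' =>
      have h2 := ih j' (k + 1) (by simpa using hj)
      unfold msPairsK at h2
      have hk : k + 1 + j' = k + (j' + 1) := by omega
      rw [hk] at h2
      rw [h1, h2, if_neg (by omega), List.getD_cons_succ]
      simp

lemma msCounts_eq_flat (idx : PySem.Dict Char (List Nat)) (e1 : String) :
    msCounts idx e1 = ((PySem.List.dedup e1.toList).flatMap (fun ch => idx.getD ch [])).foldl
      (fun c i => c.insert i (c.getD i 0 + 1)) PySem.Dict.empty := by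
  unfold msCounts
  rw [List.foldl_flatMap]

lemma getD_msCounts (idx : PySem.Dict Char (List Nat)) (e1 : String) (i : Nat) :
    (msCounts idx e1).getD i 0 =
      (((PySem.List.dedup e1.toList).map (fun ch => (idx.getD ch []).count i)).sum : Int) := by
  rw [msCounts_eq_flat, PySem.Dict.getD_foldl_insert_add_one]
  rw [List.count_flatMap]
  simp [PySem.Dict.getD_empty, Function.comp_def]

lemma sum_ite_countP (cs : List Char) (p : Char → Bool) :
    (cs.map (fun c => if p c then (1 : Nat) else 0)).sum = cs.countP p := by
  induction cs with
  | nil => simp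
  | cons c rest ih => by_cases h : p c <;> simp [h, ih, Nat.add_comm]

lemma msScore_eq_countP (e1 e2 : String) :
    msScore e1 e2 =
      ((PySem.List.dedup e1.toList).countP (fun c => e2.toList.contains c) : Int) := by
  unfold msScore
  rw [PySem.List.dedup_eq_ofList]
  simp only [PySem.Set.len, PySem.Set.inter]
  rw [List.countP_eq_length_filter]
  congr 2
  apply List.filter_congr
  intro c _
  simp only [PySem.Set.contains]
  rw [Bool.eq_iff_iff]
  simp [PySem.Set.mem_ofList]

-- counts.get(i, 0) computed from the index equals A's pairwise score, for i < len(list2)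
lemma counts_eq_score (list2 : List String) (e1 : String) (j : Nat) (hj : j < list2.length) :
    (msCounts (msIndex list2) e1).getD j 0 = msScore e1 (list2.getD j "") := by
  rw [getD_msCounts, msScore_eq_countP]
  have hterm : ∀ ch, ((msIndex list2).getD ch []).count j =
      if ch ∈ (list2.getD j "").toList then 1 else 0 := by
    intro ch
    rw [getD_msIndex, count_map_filter]
    have := count_msPairsK list2 ch j 0 hj
    simpa using this
  have : ((PySem.List.dedup e1.toList).map (fun ch => ((msIndex list2).getD ch []).count j)).sum
      = (PySem.List.dedup e1.toList).countP (fun c => (list2.getD j "").toList.contains c) := by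
    rw [← sum_ite_countP]
    congr 1
    apply List.map_congr_left
    intro c _
    rw [hterm c]
    by_cases h : c ∈ (list2.getD j "").toList
    · simp
    · simp
  rw [this]

-- the two inner selection folds coincide when f agrees with g at each position
lemma sel_eq (g : String → Int) (f : Nat → Int) :
    ∀ (l : List String) (k : Nat) (p : Int × String),
      (∀ j, j < l.length → f (k + j) = g (l.getD j "")) →
      (l.zipIdx k).foldl (fun p ei => if p.1 < f ei.2 then (f ei.2, ei.1) else p) p =
        l.foldl (fun p e2 => if p.1 < g e2 then (g e2, e2) else p) p := by
  intro l
  induction l with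
  | nil => intro k p _; simp
  | cons e2 rest ih =>
    intro k p h
    rw [List.zipIdx_cons, List.foldl_cons, List.foldl_cons]
    have h0 : f k = g e2 := by simpa using h 0 (by simp)
    rw [h0]
    exact ih (k + 1) _ (fun j hj => by
      have := h (j + 1) (by simpa using hj)
      simpa [Nat.add_assoc, Nat.add_comm 1 j] using this)

lemma msScore_nonneg (e1 e2 : String) : 0 ≤ msScore e1 e2 := by
  unfold msScore PySem.Set.len
  positivity

lemma msScore_empty (e1 : String) : msScore e1 "" = 0 := by
  simp [msScore, PySem.Set.inter, PySem.Set.contains, PySem.Set.len,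
    PySem.Set.ofList, PySem.Set.empty]

-- invariant of A's inner fold: the score is nonnegative and positive iff pos_e ≠ ""
lemma selA_invariant (e1 : String) :
    ∀ (l : List String) (p : Int × String), 0 ≤ p.1 → (0 < p.1 ↔ p.2 ≠ "") →
      let r := l.foldl (fun p e2 => if p.1 < msScore e1 e2 then (msScore e1 e2, e2) else p) p
      0 ≤ r.1 ∧ (0 < r.1 ↔ r.2 ≠ "") := by
  intro l
  induction l with
  | nil => intro p h1 h2; exact ⟨h1, h2⟩
  | cons e2 rest ih =>
    intro p h1 h2
    rw [List.foldl_cons]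
    by_cases hlt : p.1 < msScore e1 e2
    · rw [if_pos hlt]
      refine ih _ (by simp [msScore_nonneg]) ?_
      constructor
      · intro _
        simp only
        intro hEmpty
        subst hEmpty
        rw [msScore_empty] at hlt
        omega
      · intro _
        simp only
        omega
    · rw [if_neg hlt]; exact ih p h1 h2

-- per-element step equality
lemma step_eq (list2 : List String) (e1 : String) (ress : List (List String)) :
    (let p := list2.foldl (fun (p : Int × String) e2 =>
        let s := msScore e1 e2
        if p.1 < s then (s, e2) else p) (0, "")
      if p.2 ≠ "" then ress ++ [[e1, p.2]] else ress) =
    (let counts := msCounts (msIndex list2) e1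
      let p := (list2.zipIdx).foldl (fun (p : Int × String) ei =>
        let c := counts.getD ei.2 0
        if p.1 < c then (c, ei.1) else p) (0, "")
      if 0 < p.1 then ress ++ [[e1, p.2]] else ress) := by
  have hsel := sel_eq (msScore e1) (fun i => (msCounts (msIndex list2) e1).getD i 0)
    list2 0 (0, "") (fun j hj => by simpa using counts_eq_score list2 e1 j hj)
  simp only at hsel ⊢
  rw [hsel]
  have hinv := selA_invariant e1 list2 (0, "") (by simp) (by simp)
  simp only at hinv
  rcases hinv with ⟨_, hiff⟩
  by_cases hne : (list2.foldl (fun p e2 => if p.1 < msScore e1 e2 then (msScore e1 e2, e2) else p)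
      ((0 : Int), "")).2 ≠ ""
  · rw [if_pos hne, if_pos (hiff.2 hne)]
  · rw [if_neg hne, if_neg (fun hpos => hne (hiff.1 hpos))]

-- ===== VERDICT (by name: the statement is the Claim_ definition above) =====
theorem match_positive_sample_spec : Claim_equal_match_positive_sample := by
  intro list1 list2 _
  unfold Spec_match_positive_sample match_positive_sample match_positive_sample_alt
  simp only
  congr 1
  funext ress e1
  exact step_eq list2 e1 ress
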